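-- pv_equiv track=rewrite | github.com/Craciun-Alexandru/research-assistant | scripts/prefilter_papers.py | apply_avoidance_filters
-- ===== SOURCE A (Python) =====
-- from typing import List, Dict, Set
--
-- def apply_avoidance_filters(paper: Dict, avoid_criteria: List[str]) -> bool:
--     """
--     Check if paper should be avoided based on criteria.
--
--     Returns:
--         True if paper should be KEPT, False if should be FILTERED OUT
--     """
--     title_lower = paper.get('title', '').lower()
--     abstract_lower = paper.get('abstract', '').lower()
--     text = title_lower + ' ' + abstract_lower
--
--     for criterion in avoid_criteria:
--         criterion_lower = criterion.lower()
--
--         # Check for benchmark papers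
--         if 'benchmark' in criterion_lower or 'empirical' in criterion_lower:
--             benchmark_terms = ['benchmark', 'evaluation', 'comparison', 'survey']
--             has_benchmark = any(term in title_lower for term in benchmark_terms)
--
--             # Check if it has theoretical content
--             theory_terms = ['theorem', 'proof', 'theory', 'theoretical', 'analysis']
--             has_theory = any(term in abstract_lower for term in theory_terms)
--
--             if has_benchmark and not has_theory:
--                 return False  # Filter out pure benchmark papers
--
--         # Check for engineering-only papers
--         if 'engineering' in criterion_lower or 'implementation' in criterion_lower:
--             engineering_terms = ['implementation', 'system', 'framework', 'tool', 'library']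
--             has_engineering = any(term in title_lower for term in engineering_terms)
--
--             theory_terms = ['theorem', 'proof', 'theory', 'theoretical']
--             has_theory = any(term in abstract_lower for term in theory_terms)
--
--             if has_engineering and not has_theory:
--                 return False  # Filter out implementation-only papers
--
--     return True  # Keep the paper
-- ===== SOURCE B (Python) =====
-- # Data-driven rule engine: a keyword->rule-index table classifies the criteria into a set
-- # of active rule indices once; then a loop over the rule table makes the decision.
-- _TRIGGERS = {'benchmark': 0, 'empirical': 0, 'engineering': 1, 'implementation': 1}
-- _RULES = [
--     (('benchmark', 'evaluation', 'comparison', 'survey'),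
--      ('theorem', 'proof', 'theory', 'theoretical', 'analysis')),
--     (('implementation', 'system', 'framework', 'tool', 'library'),
--      ('theorem', 'proof', 'theory', 'theoretical')),
-- ]
--
-- def apply_avoidance_filters(paper, avoid_criteria):
--     title = paper.get('title', '').lower()
--     abstract = paper.get('abstract', '').lower()
--     active = {idx for c in avoid_criteria
--                   for kw, idx in _TRIGGERS.items() if kw in c.lower()}
--     for idx, (title_terms, theory_terms) in enumerate(_RULES):
--         if idx in active \
--                 and any(t in title for t in title_terms) \
--                 and not any(t in abstract for t in theory_terms):
--             return False
--     return True
-- ===== Notes on version B (the rewrite author's own statement) =====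
-- stated objective: alternative
-- what changed: B replaces A's per-criterion loop with hard-coded branches and early returns by a data-driven rule engine: a keyword-to-rule-index table classifies the criteria once into a set of active rule indices, then one generic loop over a rule table (title terms, theory terms) decides.
import Mathlib
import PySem

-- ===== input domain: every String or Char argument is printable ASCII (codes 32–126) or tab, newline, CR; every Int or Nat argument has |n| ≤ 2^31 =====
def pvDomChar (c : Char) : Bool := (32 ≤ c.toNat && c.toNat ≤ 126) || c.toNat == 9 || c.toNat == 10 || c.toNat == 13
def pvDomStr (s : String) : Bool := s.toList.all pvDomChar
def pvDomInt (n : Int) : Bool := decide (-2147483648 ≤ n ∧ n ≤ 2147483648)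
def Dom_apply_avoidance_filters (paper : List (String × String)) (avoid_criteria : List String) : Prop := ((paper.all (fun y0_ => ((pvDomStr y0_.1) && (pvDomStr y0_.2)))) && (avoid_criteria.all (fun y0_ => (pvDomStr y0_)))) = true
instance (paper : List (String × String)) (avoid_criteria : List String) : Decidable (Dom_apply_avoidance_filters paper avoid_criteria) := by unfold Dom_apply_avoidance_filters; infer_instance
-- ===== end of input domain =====

-- B replaces A's per-criterion loop with hard-coded branches by a data-driven rule engine:
-- a keyword->rule-index table classifies the criteria once into a set of active rule
-- indices, then one generic loop over a rule table decides (objective: alternative).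

-- ===== PORT A =====
-- the for-loop over avoid_criteria (early 'return False' = the two if-branches)
def pvALoop (title_lower abstract_lower : String) : List String → Bool
  | [] => true
  | criterion :: rest =>
    let criterion_lower := PySem.Str.lower criterion
    if (PySem.Str.isIn "benchmark" criterion_lower || PySem.Str.isIn "empirical" criterion_lower)
        && (["benchmark", "evaluation", "comparison", "survey"].any
              (fun term => PySem.Str.isIn term title_lower))
        && !(["theorem", "proof", "theory", "theoretical", "analysis"].any
              (fun term => PySem.Str.isIn term abstract_lower)) then
      false
    else if (PySem.Str.isIn "engineering" criterion_lower || PySem.Str.isIn "implementation" criterion_lower)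
        && (["implementation", "system", "framework", "tool", "library"].any
              (fun term => PySem.Str.isIn term title_lower))
        && !(["theorem", "proof", "theory", "theoretical"].any
              (fun term => PySem.Str.isIn term abstract_lower)) then
      false
    else
      pvALoop title_lower abstract_lower rest

def apply_avoidance_filters (paper : List (String × String)) (avoid_criteria : List String) : Bool :=
  let title_lower := PySem.Str.lower (PySem.Dict.getD (PySem.Dict.mk paper) "title" "")
  let abstract_lower := PySem.Str.lower (PySem.Dict.getD (PySem.Dict.mk paper) "abstract" "")
  pvALoop title_lower abstract_lower avoid_criteria

-- ===== PORT B =====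
-- _TRIGGERS : keyword -> rule index
def pvTriggers : List (String × Int) :=
  [("benchmark", 0), ("empirical", 0), ("engineering", 1), ("implementation", 1)]

-- _RULES : (title_terms, theory_terms) per rule index
def pvRules : List (List String × List String) :=
  [ (["benchmark", "evaluation", "comparison", "survey"],
     ["theorem", "proof", "theory", "theoretical", "analysis"]),
    (["implementation", "system", "framework", "tool", "library"],
     ["theorem", "proof", "theory", "theoretical"]) ]

-- the set comprehension {idx for c in avoid_criteria for kw, idx in _TRIGGERS.items() if kw in c.lower()}
def pvActive (avoid_criteria : List String) : PySem.Set Int :=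
  PySem.Set.ofList (avoid_criteria.flatMap (fun c =>
    pvTriggers.filterMap (fun ki =>
      if PySem.Str.isIn ki.1 (PySem.Str.lower c) then some ki.2 else none)))

-- the for-loop over enumerate(_RULES) (early 'return False')
def pvBLoop (title abstract : String) (active : PySem.Set Int) :
    List (Int × (List String × List String)) → Bool
  | [] => true
  | (idx, (title_terms, theory_terms)) :: rest =>
    if PySem.Set.contains active idx
        && title_terms.any (fun t => PySem.Str.isIn t title)
        && !(theory_terms.any (fun t => PySem.Str.isIn t abstract)) then
      false
    else pvBLoop title abstract active rest

def apply_avoidance_filters_alt (paper : List (String × String)) (avoid_criteria : List String) : Bool :=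
  let title := PySem.Str.lower (PySem.Dict.getD (PySem.Dict.mk paper) "title" "")
  let abstract := PySem.Str.lower (PySem.Dict.getD (PySem.Dict.mk paper) "abstract" "")
  pvBLoop title abstract (pvActive avoid_criteria) (PySem.List.enumerate pvRules)

-- ===== PRECONDITION & SPEC =====
def Spec_apply_avoidance_filters (paper : List (String × String)) (avoid_criteria : List String) (out : Bool) : Prop := out = apply_avoidance_filters_alt paper avoid_criteria
instance (paper : List (String × String)) (avoid_criteria : List String) (out : Bool) : Decidable (Spec_apply_avoidance_filters paper avoid_criteria out) := by unfold Spec_apply_avoidance_filters; infer_instance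

-- ===== CLAIM =====
def Claim_equal_apply_avoidance_filters : Prop := ∀ (paper : List (String × String)) (avoid_criteria : List String), Dom_apply_avoidance_filters paper avoid_criteria → Spec_apply_avoidance_filters paper avoid_criteria (apply_avoidance_filters paper avoid_criteria)

-- ===== LEMMAS AND PROOFS =====
-- membership of a rule index in the active set = some criterion contains one of its keywords
theorem pvActive_contains_zero (cs : List String) :
    PySem.Set.contains (pvActive cs) 0 =
    cs.any (fun c => PySem.Str.isIn "benchmark" (PySem.Str.lower c)
                   || PySem.Str.isIn "empirical" (PySem.Str.lower c)) := by
  rw [Bool.eq_iff_iff]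
  simp only [pvActive, PySem.Set.contains_iff, PySem.Set.mem_ofList, List.mem_flatMap,
    List.mem_filterMap, List.any_eq_true]
  constructor
  · rintro ⟨c, hc, ki, hki, hif⟩
    refine ⟨c, hc, ?_⟩
    simp only [pvTriggers] at hki
    fin_cases hki <;> split_ifs at hif <;> simp_all
  · rintro ⟨c, hc, h⟩
    rcases Bool.or_eq_true_iff.mp h with h1 | h1
    · exact ⟨c, hc, ("benchmark", 0), by simp [pvTriggers], by simpa using h1⟩
    · exact ⟨c, hc, ("empirical", 0), by simp [pvTriggers], by simpa using h1⟩

theorem pvActive_contains_one (cs : List String) :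
    PySem.Set.contains (pvActive cs) 1 =
    cs.any (fun c => PySem.Str.isIn "engineering" (PySem.Str.lower c)
                   || PySem.Str.isIn "implementation" (PySem.Str.lower c)) := by
  rw [Bool.eq_iff_iff]
  simp only [pvActive, PySem.Set.contains_iff, PySem.Set.mem_ofList, List.mem_flatMap,
    List.mem_filterMap, List.any_eq_true]
  constructor
  · rintro ⟨c, hc, ki, hki, hif⟩
    refine ⟨c, hc, ?_⟩
    simp only [pvTriggers] at hki
    fin_cases hki <;> split_ifs at hif <;> simp_all
  · rintro ⟨c, hc, h⟩
    rcases Bool.or_eq_true_iff.mp h with h1 | h1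
    · exact ⟨c, hc, ("engineering", 1), by simp [pvTriggers], by simpa using h1⟩
    · exact ⟨c, hc, ("implementation", 1), by simp [pvTriggers], by simpa using h1⟩

-- A's loop, characterised as one boolean formula over the criteria
theorem pvCaseStep (b1 e1 hb tb he te ab ae : Bool) :
    (if b1 && hb && !tb then false
     else if e1 && he && !te then false
     else !((ab && hb && !tb) || (ae && he && !te)))
    = !(((b1 || ab) && hb && !tb) || ((e1 || ae) && he && !te)) := by
  cases b1 <;> cases e1 <;> cases hb <;> cases tb <;> cases he <;> cases te <;> cases ab <;> cases ae <;> rfl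

theorem pvALoop_eq (title_lower abstract_lower : String) (cs : List String) :
    pvALoop title_lower abstract_lower cs =
    !((cs.any (fun c => PySem.Str.isIn "benchmark" (PySem.Str.lower c)
                        || PySem.Str.isIn "empirical" (PySem.Str.lower c))
        && (["benchmark", "evaluation", "comparison", "survey"].any
              (fun t => PySem.Str.isIn t title_lower))
        && !(["theorem", "proof", "theory", "theoretical", "analysis"].any
              (fun t => PySem.Str.isIn t abstract_lower)))
      || (cs.any (fun c => PySem.Str.isIn "engineering" (PySem.Str.lower c)
                        || PySem.Str.isIn "implementation" (PySem.Str.lower c))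
        && (["implementation", "system", "framework", "tool", "library"].any
              (fun t => PySem.Str.isIn t title_lower))
        && !(["theorem", "proof", "theory", "theoretical"].any
              (fun t => PySem.Str.isIn t abstract_lower)))) := by
  induction cs with
  | nil => simp [pvALoop]
  | cons c rest ih =>
    simp only [pvALoop, List.any_cons, ih]
    exact pvCaseStep _ _ _ _ _ _ _ _

-- an early-return chain of two guards equals the negated disjunction of the guards
theorem pvIfOr (c0 c1 : Bool) :
    (if c0 then false else if c1 then false else true) = !(c0 || c1) := by
  cases c0 <;> cases c1 <;> rfl

-- B's loop over the literal two-rule table, as the same kind of formula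
theorem pvBLoop_eq (title abstract : String) (active : PySem.Set Int) :
    pvBLoop title abstract active (PySem.List.enumerate pvRules) =
    !((PySem.Set.contains active 0
        && (["benchmark", "evaluation", "comparison", "survey"].any
              (fun t => PySem.Str.isIn t title))
        && !(["theorem", "proof", "theory", "theoretical", "analysis"].any
              (fun t => PySem.Str.isIn t abstract)))
      || (PySem.Set.contains active 1
        && (["implementation", "system", "framework", "tool", "library"].any
              (fun t => PySem.Str.isIn t title))
        && !(["theorem", "proof", "theory", "theoretical"].any
              (fun t => PySem.Str.isIn t abstract)))) := by
  have henum : PySem.List.enumerate pvRules =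
      [(0, (["benchmark", "evaluation", "comparison", "survey"],
            ["theorem", "proof", "theory", "theoretical", "analysis"])),
       (1, (["implementation", "system", "framework", "tool", "library"],
            ["theorem", "proof", "theory", "theoretical"]))] := by decide
  simp only [henum, pvBLoop]
  exact pvIfOr _ _

-- ===== VERDICT =====
theorem apply_avoidance_filters_spec : Claim_equal_apply_avoidance_filters := by
  intro paper avoid_criteria _
  show apply_avoidance_filters paper avoid_criteria = apply_avoidance_filters_alt paper avoid_criteria
  simp only [apply_avoidance_filters, apply_avoidance_filters_alt, pvALoop_eq, pvBLoop_eq,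
    pvActive_contains_zero, pvActive_contains_one]
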